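-- pv_equiv track=rewrite | github.com/padosol/programmers | 프로그래머스/2/60058. 괄호 변환/괄호 변환.py | right_str
-- ===== SOURCE A (Python) =====
-- def right_str(p):
--     count = 0
--     for c in p:
--         if c == "(":
--             count += 1
--         else:
--             if count:
--                 count -= 1
--
--     return count == 0
-- ===== SOURCE B (Python) =====
-- def right_str(p):
--     balance = 0
--     for c in reversed(p):
--         if c == "(":
--             balance -= 1
--         else:
--             balance += 1
--         if balance < 0:
--             return False
--     return True
-- ===== Notes on version B (the rewrite author's own statement) =====
-- stated objective: alternative
-- what changed: Scans the string right-to-left with a signed balance (+1 for every closer-like character, -1 for an opener) and returns False as soon as the balance goes negative, instead of A's forward floored unmatched-open counter compared to 0 at the end.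
import Mathlib
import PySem

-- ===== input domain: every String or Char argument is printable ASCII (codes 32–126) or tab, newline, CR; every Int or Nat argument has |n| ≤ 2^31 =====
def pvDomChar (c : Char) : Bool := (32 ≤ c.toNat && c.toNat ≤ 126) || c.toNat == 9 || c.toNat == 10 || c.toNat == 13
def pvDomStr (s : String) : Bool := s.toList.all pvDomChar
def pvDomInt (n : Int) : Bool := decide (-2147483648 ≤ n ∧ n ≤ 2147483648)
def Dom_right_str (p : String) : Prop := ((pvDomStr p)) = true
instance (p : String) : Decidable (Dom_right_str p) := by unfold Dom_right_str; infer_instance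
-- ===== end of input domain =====

-- B scans the string right-to-left with a signed balance and an early False exit,
-- instead of A's forward floored counter compared to 0 at the end (alternative, same cost).

-- ===== PORT A =====
-- for c in p: if c == "(": count += 1 else: if count: count -= 1; return count == 0
def right_str (p : String) : Bool :=
  (p.toList.foldl
    (fun count c =>
      if c = '(' then count + 1
      else if count ≠ 0 then count - 1 else count)
    (0 : Int)) == 0

-- ===== PORT B =====
-- for c in reversed(p): update signed balance, return False if it goes negative
def rightStrAltLoop (balance : Int) : List Char → Bool
  | [] => true
  | c :: rest =>
    let b := if c = '(' then balance - 1 else balance + 1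
    if b < 0 then false else rightStrAltLoop b rest

def right_str_alt (p : String) : Bool := rightStrAltLoop 0 p.toList.reverse

-- ===== PRECONDITION & SPEC =====
def Spec_right_str (p : String) (out : Bool) : Prop := out = right_str_alt p
instance (p : String) (out : Bool) : Decidable (Spec_right_str p out) := by unfold Spec_right_str; infer_instance

-- ===== CLAIM (what is proved, stated in full; the proofs are below) =====
def Claim_equal_right_str : Prop := ∀ (p : String), Dom_right_str p → Spec_right_str p (right_str p)

-- ===== LEMMAS AND PROOFS =====

-- Proof-side helpers: `P l = (unmatched opens, surplus closers)` of l, computed by peeling the FRONT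
-- character with the segment-composition rule; `scanB` is B's reverse scan returning its final balance.
def pvP : List Char → Int × Int
  | [] => (0, 0)
  | c :: t =>
    let r := pvP t
    if c = '(' then (if 0 < r.2 then (r.1, r.2 - 1) else (r.1 + 1, r.2)) else (r.1, r.2 + 1)

def pvScanB (b : Int) : List Char → Option Int
  | [] => some b
  | c :: rest =>
    let b' := if c = '(' then b - 1 else b + 1
    if b' < 0 then none else pvScanB b' rest

theorem pvP_nonneg (l : List Char) : 0 ≤ (pvP l).1 ∧ 0 ≤ (pvP l).2 := by
  induction l with
  | nil => simp [pvP]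
  | cons c t ih => simp only [pvP]; split_ifs <;> simp <;> omega

-- A's foldl in terms of pvP, for an arbitrary nonnegative start state.
theorem pvFoldA_eq (l : List Char) : ∀ o : Int, 0 ≤ o →
    l.foldl (fun count c => if c = '(' then count + 1
      else if count ≠ 0 then count - 1 else count) o
      = o - min o (pvP l).2 + (pvP l).1 := by
  induction l with
  | nil => intro o ho; simp [pvP]; omega
  | cons c t ih =>
    intro o ho
    have hP := pvP_nonneg t
    simp only [List.foldl_cons, pvP]
    by_cases hc : c = '('
    · rw [if_pos hc, if_pos hc, ih (o + 1) (by omega)]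
      split_ifs <;> simp <;> omega
    · rw [if_neg hc, if_neg hc]
      by_cases h0 : o = 0
      · rw [if_neg (by simp [h0]), h0, ih 0 le_rfl]; simp; omega
      · rw [if_pos (by simp [h0]), ih (o - 1) (by omega)]; simp; omega

theorem pvScanB_append (xs : List Char) (c : Char) : ∀ b : Int,
    pvScanB b (xs ++ [c]) = (pvScanB b xs).bind (fun s =>
      let s' := if c = '(' then s - 1 else s + 1
      if s' < 0 then none else some s') := by
  induction xs with
  | nil => intro b; simp [pvScanB]
  | cons x t ih =>
    intro b
    by_cases hx : x = '('
    · simp only [List.cons_append, pvScanB, if_pos hx]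
      by_cases hb : b - 1 < 0
      · simp [hb]
      · simp only [if_neg hb]; exact ih _
    · simp only [List.cons_append, pvScanB, if_neg hx]
      by_cases hb : b + 1 < 0
      · simp [hb]
      · simp only [if_neg hb]; exact ih _

theorem pvScanB_reverse (l : List Char) :
    pvScanB 0 l.reverse = if (pvP l).1 = 0 then some (pvP l).2 else none := by
  induction l with
  | nil => simp [pvScanB, pvP]
  | cons c t ih =>
    have hP := pvP_nonneg t
    simp only [List.reverse_cons, pvScanB_append, ih, pvP]
    by_cases hc : c = '(' <;> split_ifs <;> simp_all <;> omega

theorem pvLoop_eq_scan (l : List Char) : ∀ b : Int,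
    rightStrAltLoop b l = (pvScanB b l).isSome := by
  induction l with
  | nil => intro b; simp [rightStrAltLoop, pvScanB]
  | cons c t ih =>
    intro b
    simp only [rightStrAltLoop, pvScanB]
    split_ifs <;> simp [ih]

-- ===== VERDICT (by name: the statement is the Claim_ definition above) =====
theorem right_str_spec : Claim_equal_right_str := by
  intro p _
  unfold Spec_right_str right_str right_str_alt
  rw [pvLoop_eq_scan, pvScanB_reverse, pvFoldA_eq _ 0 le_rfl]
  have hP := pvP_nonneg p.toList
  split_ifs with h
  · simp; omega
  · simp; omega
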